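-- pv_equiv track=rewrite | github.com/Siro-i/MGA | agent/UtilTools.py | group_and_sort_by_count
-- ===== SOURCE A (Python) =====
-- from collections import Counter, defaultdict
--
-- def group_and_sort_by_count(tuples_list):
--     """
--     将相同第一元的元素聚集在一起，并按照第一元数量排序
--
--     Args:
--         tuples_list: 包含二元组的列表
--
--     Returns:
--         按照第一元数量排序后的列表，相同第一元的元素聚集在一起
--     """
--     first_element_counts = Counter([item[0] for item in tuples_list])
--
--     groups = defaultdict(list)
--     for first, second in tuples_list:
--         groups[first].append((first, second))
--     sorted_groups = sorted(groups.items(), key=lambda x: (-len(x[1]), x[0]))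
--     result = []
--     for first_element, group_items in sorted_groups:
--         group_items.sort(key=lambda x: x[1])
--         result.extend(group_items)
--
--     return result
-- ===== SOURCE B (Python) =====
-- from collections import Counter
--
-- def group_and_sort_by_count(tuples_list):
--     """Same result via three stable sorts (LSD radix): by second, then by
--     first, then by descending group count; sort stability makes equal-count
--     groups stay ordered by first and items within a group ordered by second."""
--     counts = Counter(first for first, _second in tuples_list)
--     by_second = sorted(tuples_list, key=lambda t: t[1])
--     by_first = sorted(by_second, key=lambda t: t[0])
--     return sorted(by_first, key=lambda t: -counts[t[0]])
-- ===== Notes on version B (the rewrite author's own statement) =====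
-- stated objective: simpler
-- what changed: Replaces dict-grouping plus a sort of the groups plus a per-group sort with a Counter and three global stable sorts (LSD-radix style: by second, by first, by descending count).
import Mathlib
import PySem

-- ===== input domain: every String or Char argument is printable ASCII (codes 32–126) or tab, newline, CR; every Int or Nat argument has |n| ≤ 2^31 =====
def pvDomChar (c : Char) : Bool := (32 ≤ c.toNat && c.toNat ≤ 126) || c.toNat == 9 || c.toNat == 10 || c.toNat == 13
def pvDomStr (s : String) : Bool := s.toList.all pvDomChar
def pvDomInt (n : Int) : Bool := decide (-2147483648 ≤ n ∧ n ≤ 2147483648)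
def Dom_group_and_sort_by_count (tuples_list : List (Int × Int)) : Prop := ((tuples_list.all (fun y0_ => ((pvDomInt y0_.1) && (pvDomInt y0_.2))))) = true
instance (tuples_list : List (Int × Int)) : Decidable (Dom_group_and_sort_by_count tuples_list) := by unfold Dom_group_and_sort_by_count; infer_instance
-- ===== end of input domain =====

-- B replaces dict-grouping + a sort of the groups + a per-group sort by a Counter and
-- three global stable sorts (LSD-radix style); same return value, no speed claim.

-- ===== PORT A =====
def group_and_sort_by_count (tuples_list : List (Int × Int)) : List (Int × Int) :=
  let _first_element_counts := PySem.Dict.counter (tuples_list.map (fun item => item.1))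
  let groups := tuples_list.foldl
    (fun d p => d.modify p.1 [] (fun g => g ++ [(p.1, p.2)])) PySem.Dict.empty
  let sorted_groups := PySem.List.sorted2 groups.items (fun x => -(x.2.length : Int)) (fun x => x.1)
  sorted_groups.foldl (fun result g => result ++ PySem.List.sorted g.2 (fun x => x.2)) []

-- ===== PORT B =====
def group_and_sort_by_count_alt (tuples_list : List (Int × Int)) : List (Int × Int) :=
  let counts := PySem.Dict.counter (tuples_list.map (fun t => t.1))
  let by_second := PySem.List.sorted tuples_list (fun t => t.2)
  let by_first := PySem.List.sorted by_second (fun t => t.1)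
  PySem.List.sorted by_first (fun t => -(counts.getD t.1 0))

-- ===== PRECONDITION & SPEC =====
def Spec_group_and_sort_by_count (tuples_list : List (Int × Int)) (out : List (Int × Int)) : Prop := out = group_and_sort_by_count_alt tuples_list
instance (tuples_list : List (Int × Int)) (out : List (Int × Int)) : Decidable (Spec_group_and_sort_by_count tuples_list out) := by unfold Spec_group_and_sort_by_count; infer_instance

-- ===== CLAIM (what is proved, stated in full; the proofs are below) =====
def Claim_equal_group_and_sort_by_count : Prop := ∀ (tuples_list : List (Int × Int)), Dom_group_and_sort_by_count tuples_list → Spec_group_and_sort_by_count tuples_list (group_and_sort_by_count tuples_list)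

-- ===== LEMMAS AND PROOFS =====

-- generic facts about PySem's stable insertion sort ----------------------------------

theorem insertBy_of_all_true {α : Type} (bf : α → α → Bool) (x : α) (l : List α)
    (h : ∀ b ∈ l, bf x b = true) : PySem.List.insertBy bf x l = x :: l := by
  cases l with
  | nil => rfl
  | cons a t =>
    have : bf x a = true := h a (by simp)
    simp [PySem.List.insertBy, this]

theorem insertBy_split {α : Type} (bf : α → α → Bool) (x : α) (l₁ l₂ : List α)
    (h1 : ∀ b ∈ l₁, bf x b = false) (h2 : ∀ b ∈ l₂, bf x b = true) :
    PySem.List.insertBy bf x (l₁ ++ l₂) = l₁ ++ x :: l₂ := by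
  induction l₁ with
  | nil => simpa using insertBy_of_all_true bf x l₂ h2
  | cons a t ih =>
    have ha : bf x a = false := h1 a (by simp)
    have : PySem.List.insertBy bf x (a :: (t ++ l₂)) = a :: PySem.List.insertBy bf x (t ++ l₂) := by
      simp [PySem.List.insertBy, ha]
    simpa [this] using congrArg (a :: ·) (ih (fun b hb => h1 b (by simp [hb])))

theorem sorted_append_singleton {α κ : Type} [LinearOrder κ] (xs : List α) (x : α) (k : α → κ) :
    PySem.List.sorted (xs ++ [x]) k =
      PySem.List.insertBy (fun a b => decide (k a < k b)) x (PySem.List.sorted xs k) := by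
  rw [PySem.List.sorted_eq_foldl_insertBy, PySem.List.sorted_eq_foldl_insertBy, List.foldl_append]
  rfl

theorem filter_insertBy_neg {α : Type} (bf : α → α → Bool) (p : α → Bool) (x : α) (s : List α)
    (hp : p x = false) : (PySem.List.insertBy bf x s).filter p = s.filter p := by
  induction s with
  | nil => simp [PySem.List.insertBy, hp]
  | cons a t ih =>
    by_cases hba : bf x a = true
    · simp [PySem.List.insertBy, hba, hp]
    · simp only [Bool.not_eq_true] at hba
      by_cases hpa : p a = true
      · simp [PySem.List.insertBy, hba, hpa, ih]
      · simp only [Bool.not_eq_true] at hpa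
        simp [PySem.List.insertBy, hba, hpa, ih]

theorem filter_insertBy_pos {α κ : Type} [LinearOrder κ] (k : α → κ) (p : α → Bool) (x : α)
    (s : List α) (hp : p x = true) (hs : s.Pairwise (fun a b => k a ≤ k b)) :
    (PySem.List.insertBy (fun a b => decide (k a < k b)) x s).filter p =
      PySem.List.insertBy (fun a b => decide (k a < k b)) x (s.filter p) := by
  induction s with
  | nil => simp [PySem.List.insertBy, hp]
  | cons a t ih =>
    rcases List.pairwise_cons.mp hs with ⟨hat, ht⟩
    by_cases hba : k x < k a
    · have hall : ∀ b ∈ List.filter p (a :: t), decide (k x < k b) = true := by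
        intro b hb
        rcases List.mem_cons.mp (List.mem_of_mem_filter hb) with rfl | hbt
        · simpa using hba
        · simpa using lt_of_lt_of_le hba (hat b hbt)
      have hr := insertBy_of_all_true (fun a b => decide (k a < k b)) x _ hall
      rw [hr]
      simp [PySem.List.insertBy, hba, hp]
    · have hba' : decide (k x < k a) = false := by simpa using hba
      by_cases hpa : p a = true
      · have : PySem.List.insertBy (fun a b => decide (k a < k b)) x (List.filter p (a :: t)) =
            a :: PySem.List.insertBy (fun a b => decide (k a < k b)) x (List.filter p t) := by
          simp [List.filter, hpa, PySem.List.insertBy, hba']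
        rw [this]
        simp [PySem.List.insertBy, hba', hpa, ih ht]
      · simp only [Bool.not_eq_true] at hpa
        simp [PySem.List.insertBy, hba', List.filter, hpa, ih ht]

-- stability: filtering commutes with a stable sort
theorem filter_sorted {α κ : Type} [LinearOrder κ] (xs : List α) (k : α → κ) (p : α → Bool) :
    (PySem.List.sorted xs k).filter p = PySem.List.sorted (xs.filter p) k := by
  induction xs using List.reverseRecOn with
  | nil => rfl
  | append_singleton xs x ih =>
    rw [sorted_append_singleton, List.filter_append]
    by_cases hpx : p x = true
    · rw [filter_insertBy_pos k p x _ hpx (PySem.List.sorted_pairwise xs k), ih]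
      simp [hpx, sorted_append_singleton]
    · simp only [Bool.not_eq_true] at hpx
      rw [filter_insertBy_neg _ p x _ hpx, ih]
      simp [hpx]

theorem split_not_mem {κ : Type} [LinearOrder κ] (cs : List κ) (v : κ)
    (hp : cs.Pairwise (· < ·)) (hv : v ∉ cs) :
    ∃ c₁ c₂, cs = c₁ ++ c₂ ∧ (∀ c ∈ c₁, c < v) ∧ (∀ c ∈ c₂, v < c) := by
  induction cs with
  | nil => exact ⟨[], [], rfl, by simp, by simp⟩
  | cons a t ih =>
    rcases List.pairwise_cons.mp hp with ⟨hat, ht⟩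
    have hav : a ≠ v := fun h => hv (h ▸ List.mem_cons_self ..)
    by_cases hlt : a < v
    · obtain ⟨c₁, c₂, heq, h1, h2⟩ := ih ht (fun h => hv (List.mem_cons_of_mem _ h))
      exact ⟨a :: c₁, c₂, by simp [heq], by
        intro c hc
        rcases List.mem_cons.mp hc with rfl | hc
        · exact hlt
        · exact h1 c hc, h2⟩
    · have hva : v < a := lt_of_le_of_ne (le_of_not_gt hlt) (Ne.symm hav)
      refine ⟨[], a :: t, rfl, by simp, ?_⟩
      intro c hc
      rcases List.mem_cons.mp hc with rfl | hc
      · exact hva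
      · exact lt_trans hva (hat c hc)

theorem flatMap_congr_mem {α β : Type} (l : List α) (f g : α → List β)
    (h : ∀ a ∈ l, f a = g a) : l.flatMap f = l.flatMap g := by
  induction l with
  | nil => rfl
  | cons a t ih =>
    simp only [List.flatMap_cons, h a (by simp), ih (fun b hb => h b (by simp [hb]))]

theorem pairwise_flatMap {α β : Type} (l : List α) (h : α → List β) (R : β → β → Prop)
    (hcross : l.Pairwise (fun a a' => ∀ b ∈ h a, ∀ b' ∈ h a', R b b'))
    (hin : ∀ a ∈ l, (h a).Pairwise R) : (l.flatMap h).Pairwise R := by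
  induction l with
  | nil => simp
  | cons a t ih =>
    rcases List.pairwise_cons.mp hcross with ⟨hc, ht⟩
    rw [List.flatMap_cons, List.pairwise_append]
    refine ⟨hin a (by simp), ih ht (fun b hb => hin b (by simp [hb])), ?_⟩
    intro b hb b' hb'
    rcases List.mem_flatMap.mp hb' with ⟨a', ha', hb'a⟩
    exact hc a' ha' b hb b' hb'a

-- stability: a stable sort is the concatenation of the original-order blocks,
-- one per distinct key value, in increasing key order
theorem sorted_blocks {α : Type} (xs : List α) (k : α → Int) :
    PySem.List.sorted xs k =
      (PySem.List.sorted (PySem.Set.ofList (xs.map k)) (fun v => v)).flatMap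
        (fun c => xs.filter (fun y => k y == c)) := by
  induction xs using List.reverseRecOn with
  | nil => rfl
  | append_singleton xs x ih =>
    have hcs : (PySem.List.sorted (PySem.Set.ofList (xs.map k)) (fun v => v)).Pairwise (· < ·) :=
      PySem.List.sorted_ofList_pairwise_lt _
    have hbf : ∀ c : Int, (xs ++ [x]).filter (fun y => k y == c) =
        xs.filter (fun y => k y == c) ++ if k x == c then [x] else [] := by
      intro c
      by_cases h : k x == c <;> simp [List.filter_append, h]
    rw [sorted_append_singleton, ih]
    have hmapp : (xs ++ [x]).map k = xs.map k ++ [k x] := by simp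
    rw [hmapp, PySem.Set.ofList_append_singleton]
    by_cases hv : k x ∈ xs.map k
    · have hadd : (PySem.Set.ofList (xs.map k)).add (k x) = PySem.Set.ofList (xs.map k) := by
        have hc : (PySem.Set.ofList (xs.map k)).contains (k x) = true := by
          rw [PySem.Set.contains]
          exact List.contains_iff_mem.mpr ((PySem.Set.mem_ofList (xs.map k) (k x)).mpr hv)
        rw [PySem.Set.add, if_pos hc]
      rw [hadd]
      have hvcs : k x ∈ PySem.List.sorted (PySem.Set.ofList (xs.map k)) (fun v => v) :=
        (PySem.List.mem_sorted _ _ _ _).mpr ((PySem.Set.mem_ofList _ _).mpr hv)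
      obtain ⟨c₁, c₂, hsplit⟩ := List.append_of_mem hvcs
      rw [hsplit] at hcs ⊢
      rcases List.pairwise_append.mp hcs with ⟨-, hpc2, hcross⟩
      have h1 : ∀ c ∈ c₁, c < k x := fun c hc => hcross c hc (k x) (by simp)
      have h2 : ∀ c ∈ c₂, k x < c := (List.pairwise_cons.mp hpc2).1
      rw [List.flatMap_append, List.flatMap_cons, List.flatMap_append, List.flatMap_cons]
      have hc1 : c₁.flatMap (fun c => (xs ++ [x]).filter (fun y => k y == c)) =
          c₁.flatMap (fun c => xs.filter (fun y => k y == c)) := by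
        apply flatMap_congr_mem
        intro c hc
        have : (k x == c) = false := beq_eq_false_iff_ne.mpr (ne_of_gt (h1 c hc))
        simp [hbf c, this]
      have hc2 : c₂.flatMap (fun c => (xs ++ [x]).filter (fun y => k y == c)) =
          c₂.flatMap (fun c => xs.filter (fun y => k y == c)) := by
        apply flatMap_congr_mem
        intro c hc
        have : (k x == c) = false := beq_eq_false_iff_ne.mpr (ne_of_lt (h2 c hc))
        simp [hbf c, this]
      rw [hc1, hc2, hbf (k x)]
      simp only [beq_self_eq_true, if_pos]
      rw [← List.append_assoc]
      have hins := insertBy_split (fun a b => decide (k a < k b)) x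
        (c₁.flatMap (fun c => xs.filter (fun y => k y == c)) ++ xs.filter (fun y => k y == k x))
        (c₂.flatMap (fun c => xs.filter (fun y => k y == c)))
        (by
          intro b hb
          rcases List.mem_append.mp hb with hb | hb
          · rcases List.mem_flatMap.mp hb with ⟨c, hc, hbc⟩
            have : k b = c := by simpa using List.of_mem_filter hbc
            simp [this, not_lt_of_gt (h1 c hc)]
          · have : k b = k x := by simpa using List.of_mem_filter hb
            simp [this]
        )
        (by
          intro b hb
          rcases List.mem_flatMap.mp hb with ⟨c, hc, hbc⟩
          have : k b = c := by simpa using List.of_mem_filter hbc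
          simp [this, h2 c hc]
        )
      rw [hins]
      simp
    · have hadd : (PySem.Set.ofList (xs.map k)).add (k x) = PySem.Set.ofList (xs.map k) ++ [k x] := by
        have hc : (PySem.Set.ofList (xs.map k)).contains (k x) = false := by
          have hmem : k x ∉ PySem.Set.ofList (List.map k xs) :=
            fun h => hv ((PySem.Set.mem_ofList _ _).mp h)
          rw [PySem.Set.contains]
          exact Bool.eq_false_iff.mpr (fun h => hmem (List.contains_iff_mem.mp h))
        rw [PySem.Set.add, if_neg (by rw [hc]; exact Bool.false_ne_true)]
      rw [hadd, sorted_append_singleton]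
      have hvcs : k x ∉ PySem.List.sorted (PySem.Set.ofList (xs.map k)) (fun v => v) := by
        rw [PySem.List.mem_sorted, PySem.Set.mem_ofList]
        exact hv
      obtain ⟨c₁, c₂, hsplit, h1, h2⟩ := split_not_mem _ (k x) hcs hvcs
      rw [hsplit]
      have hinsv := insertBy_split (fun a b => decide ((fun v => v) a < (fun v => v) b)) (k x) c₁ c₂
        (by intro b hb; simpa using not_lt_of_gt (h1 b hb))
        (by intro b hb; simpa using h2 b hb)
      rw [hinsv]
      conv_rhs => rw [List.flatMap_append, List.flatMap_cons]
      rw [List.flatMap_append]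
      have hc1 : c₁.flatMap (fun c => (xs ++ [x]).filter (fun y => k y == c)) =
          c₁.flatMap (fun c => xs.filter (fun y => k y == c)) := by
        apply flatMap_congr_mem
        intro c hc
        have : (k x == c) = false := beq_eq_false_iff_ne.mpr (ne_of_gt (h1 c hc))
        simp [hbf c, this]
      have hc2 : c₂.flatMap (fun c => (xs ++ [x]).filter (fun y => k y == c)) =
          c₂.flatMap (fun c => xs.filter (fun y => k y == c)) := by
        apply flatMap_congr_mem
        intro c hc
        have : (k x == c) = false := beq_eq_false_iff_ne.mpr (ne_of_lt (h2 c hc))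
        simp [hbf c, this]
      rw [hc1, hc2, hbf (k x)]
      have hemp : xs.filter (fun y => k y == k x) = [] := by
        rw [List.filter_eq_nil_iff]
        intro y hy h
        exact hv (List.mem_map.mpr ⟨y, hy, by simpa using h⟩)
      rw [hemp]
      simp only [beq_self_eq_true, if_pos, List.nil_append]
      have hins := insertBy_split (fun a b => decide (k a < k b)) x
        (c₁.flatMap (fun c => xs.filter (fun y => k y == c)))
        (c₂.flatMap (fun c => xs.filter (fun y => k y == c)))
        (by
          intro b hb
          rcases List.mem_flatMap.mp hb with ⟨c, hc, hbc⟩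
          have : k b = c := by simpa using List.of_mem_filter hbc
          simp [this, not_lt_of_gt (h1 c hc)]
        )
        (by
          intro b hb
          rcases List.mem_flatMap.mp hb with ⟨c, hc, hbc⟩
          have : k b = c := by simpa using List.of_mem_filter hbc
          simp [this, h2 c hc]
        )
      rw [hins]
      simp

-- uniqueness: an insertion sort over an asymmetric 'before' test equals any
-- rearrangement that is pairwise strictly 'before'
theorem foldl_insertBy_eq_of_perm {α : Type} (bf : α → α → Bool)
    (hasym : ∀ a b, bf a b = true → bf b a = false) (xs ys : List α)
    (hperm : ys.Perm xs) (hpw : ys.Pairwise (fun a b => bf a b = true)) :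
    xs.foldl (fun acc x => PySem.List.insertBy bf x acc) [] = ys := by
  induction xs using List.reverseRecOn generalizing ys with
  | nil => simpa using List.perm_nil.mp hperm
  | append_singleton xs x ih =>
    have hx : x ∈ ys := hperm.mem_iff.mpr (by simp)
    obtain ⟨l₁, l₂, rfl⟩ := List.append_of_mem hx
    have hperm' : (l₁ ++ l₂).Perm xs := by
      have h1 : (x :: (l₁ ++ l₂)).Perm (x :: xs) :=
        (List.perm_middle.symm.trans hperm).trans (List.perm_append_singleton x xs)
      exact h1.cons_inv
    have hpw' : (l₁ ++ l₂).Pairwise (fun a b => bf a b = true) :=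
      hpw.sublist (List.Sublist.append (List.Sublist.refl _) (List.sublist_cons_self x l₂))
    rw [List.foldl_append]
    simp only [List.foldl_cons, List.foldl_nil]
    rw [ih (l₁ ++ l₂) hperm' hpw']
    apply insertBy_split
    · intro b hb
      rcases List.pairwise_append.mp hpw with ⟨-, -, hcross⟩
      exact hasym b x (hcross b hb x (by simp))
    · intro b hb
      rcases List.pairwise_append.mp hpw with ⟨-, hc, -⟩
      exact (List.pairwise_cons.mp hc).1 b hb

-- task-specific abbreviations (proof-side only) --------------------------------------

def pvCnt (xs : List (Int × Int)) (f : Int) : Int := ((xs.map (fun y => y.1)).count f : Int)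

def pvBlock (xs : List (Int × Int)) (f : Int) : List (Int × Int) :=
  xs.filter (fun y => y.1 == f)

def pvG (xs : List (Int × Int)) (t : Int × Int) : Int := -(pvCnt xs t.1)

def pvByFirst (xs : List (Int × Int)) : List (Int × Int) :=
  PySem.List.sorted (PySem.List.sorted xs (fun t => t.2)) (fun t => t.1)

def pvCs (xs : List (Int × Int)) : List Int :=
  PySem.List.sorted (PySem.Set.ofList ((pvByFirst xs).map (pvG xs))) (fun v => v)

def pvDs (xs : List (Int × Int)) (c : Int) : List Int :=
  PySem.List.sorted
    (PySem.Set.ofList ((PySem.List.sorted (xs.filter (fun y => pvG xs y == c)) (fun t => t.2)).map (fun y => y.1)))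
    (fun v => v)

def pvLf (xs : List (Int × Int)) : List Int := (pvCs xs).flatMap (pvDs xs)

theorem mem_pvDs (xs : List (Int × Int)) (c f : Int) (h : f ∈ pvDs xs c) :
    -(pvCnt xs f) = c ∧ f ∈ xs.map (fun y => y.1) := by
  rw [pvDs, PySem.List.mem_sorted, PySem.Set.mem_ofList] at h
  rcases List.mem_map.mp h with ⟨y, hy, rfl⟩
  rw [PySem.List.mem_sorted] at hy
  rcases List.mem_filter.mp hy with ⟨hyx, hq⟩
  refine ⟨?_, List.mem_map.mpr ⟨y, hyx, rfl⟩⟩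
  have : pvG xs y = c := by simpa using hq
  simpa [pvG] using this

theorem alt_eq_blocks (xs : List (Int × Int)) :
    group_and_sort_by_count_alt xs =
      (pvLf xs).flatMap (fun f => PySem.List.sorted (pvBlock xs f) (fun y => y.2)) := by
  have hkey : (fun t : Int × Int => -((PySem.Dict.counter (xs.map (fun t => t.1))).getD t.1 0)) = pvG xs := by
    funext t
    rw [PySem.Dict.getD_counter]
    rfl
  show PySem.List.sorted (PySem.List.sorted (PySem.List.sorted xs (fun t => t.2)) (fun t => t.1))
      (fun t => -((PySem.Dict.counter (xs.map (fun t => t.1))).getD t.1 0)) = _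
  rw [hkey]
  rw [show PySem.List.sorted (PySem.List.sorted xs (fun t => t.2)) (fun t => t.1) = pvByFirst xs from rfl]
  rw [sorted_blocks (pvByFirst xs) (pvG xs)]
  rw [show PySem.List.sorted (PySem.Set.ofList ((pvByFirst xs).map (pvG xs))) (fun v => v) = pvCs xs from rfl]
  rw [pvLf, List.flatMap_assoc]
  apply flatMap_congr_mem
  intro c _
  rw [pvByFirst, filter_sorted, filter_sorted]
  rw [sorted_blocks (PySem.List.sorted (xs.filter (fun y => pvG xs y == c)) (fun t => t.2)) (fun y => y.1)]
  rw [show PySem.List.sorted (PySem.Set.ofList ((PySem.List.sorted (xs.filter (fun y => pvG xs y == c)) (fun t => t.2)).map (fun y => y.1))) (fun v => v) = pvDs xs c from rfl]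
  apply flatMap_congr_mem
  intro f hf
  have hcnt : -(pvCnt xs f) = c := (mem_pvDs xs c f hf).1
  rw [filter_sorted]
  congr 1
  rw [List.filter_filter]
  apply List.filter_congr
  intro y _
  by_cases hyf : y.1 = f
  · have : pvG xs y = c := by rw [pvG, hyf, hcnt]
    simp [hyf, this]
  · simp [hyf]

theorem block_length (xs : List (Int × Int)) (f : Int) :
    ((pvBlock xs f).length : Int) = pvCnt xs f := by
  rw [pvCnt, pvBlock, List.count_eq_countP, List.countP_map, List.countP_eq_length_filter]
  rfl

theorem keys_group_foldl (xs : List (Int × Int)) :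
    (xs.foldl (fun d p => d.modify p.1 [] (fun g => g ++ [(p.1, p.2)])) PySem.Dict.empty).keys =
      PySem.Set.ofList (xs.map (fun y => y.1)) := by
  induction xs using List.reverseRecOn with
  | nil => simp [PySem.Dict.keys_empty]
  | append_singleton xs p ih =>
    rw [List.foldl_append]
    simp only [List.foldl_cons, List.foldl_nil]
    rw [PySem.Dict.keys_modify]
    have hmap : (xs ++ [p]).map (fun y : Int × Int => y.1) = xs.map (fun y => y.1) ++ [p.1] := by simp
    rw [hmap, PySem.Set.ofList_append_singleton]
    by_cases hmem : p.1 ∈ xs.map (fun y : Int × Int => y.1)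
    · have hc : (xs.foldl (fun d p => d.modify p.1 [] (fun g => g ++ [(p.1, p.2)])) PySem.Dict.empty).contains p.1 = true := by
        rw [PySem.Dict.contains_iff_mem_keys, ih, PySem.Set.mem_ofList]
        exact hmem
      rw [PySem.Dict.keys_insert_of_contains _ _ hc, ih, PySem.Set.add,
        if_pos (by rw [PySem.Set.contains]; exact List.contains_iff_mem.mpr ((PySem.Set.mem_ofList _ _).mpr hmem))]
    · have hc : (xs.foldl (fun d p => d.modify p.1 [] (fun g => g ++ [(p.1, p.2)])) PySem.Dict.empty).contains p.1 = false := by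
        rw [Bool.eq_false_iff]
        intro h
        rw [PySem.Dict.contains_iff_mem_keys, ih, PySem.Set.mem_ofList] at h
        exact hmem h
      rw [PySem.Dict.keys_insert_of_not_contains _ _ hc, ih, PySem.Set.add,
        if_neg (by
          rw [PySem.Set.contains]
          intro h
          exact hmem ((PySem.Set.mem_ofList _ _).mp (List.contains_iff_mem.mp h)))]

theorem getD_group_foldl (xs : List (Int × Int)) (c : Int) :
    (xs.foldl (fun d p => d.modify p.1 [] (fun g => g ++ [(p.1, p.2)])) PySem.Dict.empty).getD c [] =
      pvBlock xs c := by
  have h := PySem.Dict.getD_foldl_modify_append (xs.map (fun p => (p.1, (p.1, p.2)))) PySem.Dict.empty c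
  rw [List.foldl_map] at h
  simp only [PySem.Dict.getD_empty, List.nil_append, List.filter_map, List.map_map] at h
  rw [h, pvBlock]
  have : ((fun p : Int × (Int × Int) => p.1 == c) ∘ fun p : Int × Int => (p.1, (p.1, p.2))) =
      fun y : Int × Int => y.1 == c := rfl
  rw [this]
  exact List.map_congr_left (fun a _ => rfl) |>.trans (List.map_id _)

theorem items_eq_keys_map {κ ν : Type} [BEq κ] [LawfulBEq κ] (d : PySem.Dict κ ν) (d0 : ν)
    (h : d.keys.Nodup) : d.items = d.keys.map (fun k => (k, d.getD k d0)) := by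
  apply List.ext_getElem
  · simp [PySem.Dict.keys]
  · intro i h1 h2
    rw [List.getElem_map]
    have hmem : d.items[i] ∈ d.items := List.getElem_mem _
    have hkeylen : i < d.keys.length := by simpa [PySem.Dict.keys] using h1
    have hkey : d.keys[i]'hkeylen = d.items[i].1 := by
      simp [PySem.Dict.keys]
    have hval := PySem.Dict.getD_of_mem_items d (k := d.items[i].1) (v := d.items[i].2)
      (by exact_mod_cast hmem) h d0
    refine Prod.ext ?_ ?_
    · exact hkey.symm
    · show d.items[i].2 = d.getD _ d0
      rw [hkey, hval]

theorem a_eq_blocks (xs : List (Int × Int)) :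
    group_and_sort_by_count xs =
      (pvLf xs).flatMap (fun f => PySem.List.sorted (pvBlock xs f) (fun y => y.2)) := by
  classical
  set D := xs.foldl (fun d p => d.modify p.1 [] (fun g => g ++ [(p.1, p.2)])) PySem.Dict.empty with hD
  have hkeys : D.keys = PySem.Set.ofList (xs.map (fun y => y.1)) := keys_group_foldl xs
  have hnd : D.keys.Nodup := by rw [hkeys]; exact PySem.Set.nodup_ofList _
  have hitems : D.items = (PySem.Set.ofList (xs.map (fun y => y.1))).map (fun f => (f, pvBlock xs f)) := by
    rw [items_eq_keys_map D [] hnd, hkeys]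
    exact List.map_congr_left (fun f _ => by rw [hD, getD_group_foldl])
  -- the sorted2 of the items is the pvLf-ordered list of groups
  have hbfasym : ∀ a b : Int × List (Int × Int),
      (decide (-(a.2.length : Int) < -(b.2.length : Int)) ||
        (!decide (-(b.2.length : Int) < -(a.2.length : Int)) && decide (a.1 < b.1))) = true →
      (decide (-(b.2.length : Int) < -(a.2.length : Int)) ||
        (!decide (-(a.2.length : Int) < -(b.2.length : Int)) && decide (b.1 < a.1))) = false := by
    intro a b h
    by_cases h1 : (-(a.2.length : Int) < -(b.2.length : Int)) <;>
      by_cases h2 : (-(b.2.length : Int) < -(a.2.length : Int)) <;>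
      by_cases h3 : (a.1 < b.1) <;> by_cases h4 : (b.1 < a.1) <;>
      simp [h1, h2, h3, h4] at h ⊢ <;> omega
  have hLfpw : (pvLf xs).Pairwise (fun f f' =>
      -(pvCnt xs f) < -(pvCnt xs f') ∨ (-(pvCnt xs f) = -(pvCnt xs f') ∧ f < f')) := by
    apply pairwise_flatMap
    · refine (PySem.List.sorted_ofList_pairwise_lt _).imp ?_
      intro c c' hlt f hf f' hf'
      left
      rw [(mem_pvDs xs c f hf).1, (mem_pvDs xs c' f' hf').1]
      exact hlt
    · intro c _
      refine (PySem.List.sorted_ofList_pairwise_lt _).imp_of_mem ?_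
      intro f f' hf hf' hlt
      right
      exact ⟨by rw [(mem_pvDs xs c f hf).1, (mem_pvDs xs c f' hf').1], hlt⟩
  have hLfnd : (pvLf xs).Nodup := hLfpw.imp (by
    intro f f' h
    rcases h with h | ⟨-, h⟩
    · intro he; rw [he] at h; exact lt_irrefl _ h
    · exact ne_of_lt h)
  have hLfmem : ∀ f, f ∈ pvLf xs ↔ f ∈ PySem.Set.ofList (xs.map (fun y => y.1)) := by
    intro f
    constructor
    · intro h
      rcases List.mem_flatMap.mp h with ⟨c, _, hf⟩
      rw [PySem.Set.mem_ofList]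
      exact (mem_pvDs xs c f hf).2
    · intro h
      rw [PySem.Set.mem_ofList] at h
      rcases List.mem_map.mp h with ⟨y, hy, rfl⟩
      apply List.mem_flatMap.mpr
      refine ⟨pvG xs y, ?_, ?_⟩
      · rw [pvCs, PySem.List.mem_sorted, PySem.Set.mem_ofList]
        apply List.mem_map.mpr
        refine ⟨y, ?_, rfl⟩
        rw [pvByFirst, PySem.List.mem_sorted, PySem.List.mem_sorted]
        exact hy
      · rw [pvDs, PySem.List.mem_sorted, PySem.Set.mem_ofList]
        apply List.mem_map.mpr
        refine ⟨y, ?_, rfl⟩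
        rw [PySem.List.mem_sorted]
        apply List.mem_filter.mpr
        exact ⟨hy, by simp⟩
  have hLfperm : (pvLf xs).Perm (PySem.Set.ofList (xs.map (fun y => y.1))) :=
    (List.perm_ext_iff_of_nodup hLfnd (PySem.Set.nodup_ofList _)).mpr hLfmem
  have hperm : ((pvLf xs).map (fun f => (f, pvBlock xs f))).Perm D.items := by
    rw [hitems]
    exact hLfperm.map _
  have hpw : ((pvLf xs).map (fun f => (f, pvBlock xs f))).Pairwise (fun a b =>
      (decide (-(a.2.length : Int) < -(b.2.length : Int)) ||
        (!decide (-(b.2.length : Int) < -(a.2.length : Int)) && decide (a.1 < b.1))) = true) := by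
    rw [List.pairwise_map]
    refine hLfpw.imp ?_
    intro f f' h
    simp only [Bool.or_eq_true, Bool.and_eq_true, Bool.not_eq_eq_eq_not, Bool.not_true,
      decide_eq_true_iff, decide_eq_false_iff_not]
    rw [block_length, block_length]
    rcases h with h | ⟨h1, h2⟩
    · exact Or.inl h
    · exact Or.inr ⟨by omega, h2⟩
  have hsorted2 : PySem.List.sorted2 D.items (fun x => -(x.2.length : Int)) (fun x => x.1) =
      (pvLf xs).map (fun f => (f, pvBlock xs f)) :=
    foldl_insertBy_eq_of_perm _ hbfasym _ _ hperm hpw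
  show (PySem.List.sorted2 D.items (fun x => -(x.2.length : Int)) (fun x => x.1)).foldl
      (fun result g => result ++ PySem.List.sorted g.2 (fun x => x.2)) [] = _
  rw [hsorted2, PySem.List.foldl_append_eq_flatMap, List.flatMap_map]
  rfl

-- ===== VERDICT (by name: the statement is the Claim_ definition above) =====
theorem group_and_sort_by_count_spec : Claim_equal_group_and_sort_by_count := by
  intro xs _
  unfold Spec_group_and_sort_by_count
  rw [a_eq_blocks, alt_eq_blocks]
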